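-- pv_equiv track=rewrite | github.com/MikhailKras/tinkoff_autumn_2023 | 3/solution_sort.py | solution
-- ===== SOURCE A (Python) =====
-- def solution(n, start_seq, end_seq):
--     if n == 1:
--         return "YES"
--
--     start_seq_count_dict, end_seq_count_dict = {}, {}
--     for start_seq_elem, end_seq_elem in zip(start_seq, end_seq):
--         start_seq_count_dict[start_seq_elem] = start_seq_count_dict.get(start_seq_elem, 0) + 1
--         end_seq_count_dict[end_seq_elem] = end_seq_count_dict.get(end_seq_elem, 0) + 1
--     if start_seq_count_dict != end_seq_count_dict:
--         return "NO"
--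
--     left, right = 0, n-1
--     while left <= right and (start_seq[left] == end_seq[left] or start_seq[right] == end_seq[right]):
--         if start_seq[left] == end_seq[left]:
--             left += 1
--         if start_seq[right] == end_seq[right]:
--             right -= 1
--
--     if sorted(start_seq[left:right + 1]) == end_seq[left:right + 1]:
--         return "YES"
--
--     return "NO"
-- ===== SOURCE B (Python) =====
-- def solution(n, start_seq, end_seq):
--     if n == 1:
--         return "YES"
--
--     # multiset comparison via a single balance dict instead of two counters
--     bal = {}
--     for a, b in zip(start_seq, end_seq):
--         bal[a] = bal.get(a, 0) + 1
--         bal[b] = bal.get(b, 0) - 1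
--     if any(bal.values()):
--         return "NO"
--
--     # trim the equal prefix and suffix with two independent linear scans
--     left = 0
--     while left < n and start_seq[left] == end_seq[left]:
--         left += 1
--     right = n - 1
--     while right > left and start_seq[right] == end_seq[right]:
--         right -= 1
--
--     mid_start = start_seq[left:right + 1]
--     mid_end = end_seq[left:right + 1]
--
--     # the target window must be non-decreasing ...
--     if any(x > y for x, y in zip(mid_end, mid_end[1:])):
--         return "NO"
--
--     # ... and a permutation of the source window (no sorting anywhere)
--     wbal = {}
--     for a, b in zip(mid_start, mid_end):
--         wbal[a] = wbal.get(a, 0) + 1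
--         wbal[b] = wbal.get(b, 0) - 1
--     return "NO" if any(wbal.values()) else "YES"
-- ===== Notes on version B (the rewrite author's own statement) =====
-- stated objective: alternative
-- what changed: Replaces the sort-and-compare of the mismatching window by a one-pass non-decreasing check plus a +1/-1 balance dict for the permutation test, and the two-counter dict comparison by one balance dict; no sorting anywhere (fewer comparisons asymptotically, but CPython's C sort makes the measured times comparable).
-- outside the precondition, e.g. on solution(-1, [1, 2], [1, 2, 9]): A returns 'NO', B returns 'YES'
import Mathlib
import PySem

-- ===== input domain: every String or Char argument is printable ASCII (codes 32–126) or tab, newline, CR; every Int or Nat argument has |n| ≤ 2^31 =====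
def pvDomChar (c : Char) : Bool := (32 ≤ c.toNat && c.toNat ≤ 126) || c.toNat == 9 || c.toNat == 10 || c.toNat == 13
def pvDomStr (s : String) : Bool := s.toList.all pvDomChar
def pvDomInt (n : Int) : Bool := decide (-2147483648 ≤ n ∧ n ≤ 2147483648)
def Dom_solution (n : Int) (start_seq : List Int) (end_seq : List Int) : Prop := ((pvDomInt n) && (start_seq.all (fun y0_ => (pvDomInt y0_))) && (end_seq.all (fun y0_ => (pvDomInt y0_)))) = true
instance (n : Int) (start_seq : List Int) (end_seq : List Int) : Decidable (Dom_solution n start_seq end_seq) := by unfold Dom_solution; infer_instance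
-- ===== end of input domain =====

-- B replaces A's sort-and-compare of the mismatch window by a one-pass non-decreasing check plus
-- a +1/-1 balance dict (and one balance dict instead of two counters): no sorting anywhere.

-- ===== PORT A =====
-- Python's `dict == dict` is order-insensitive: same key set, same value at every key.
def pyDictEq (d1 d2 : PySem.Dict Int Int) : Bool :=
  PySem.Set.equal d1.keys d2.keys && d1.keys.all (fun k => d1.get? k == d2.get? k)

-- the `while left <= right and (...)` loop of A, verbatim
def loopA (s e : List Int) (left right : Int) : Int × Int :=
  if h : left ≤ right ∧ (PySem.List.pyGetD s left 0 = PySem.List.pyGetD e left 0 ∨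
                         PySem.List.pyGetD s right 0 = PySem.List.pyGetD e right 0) then
    loopA s e
      (if PySem.List.pyGetD s left 0 = PySem.List.pyGetD e left 0 then left + 1 else left)
      (if PySem.List.pyGetD s right 0 = PySem.List.pyGetD e right 0 then right - 1 else right)
  else (left, right)
termination_by (right + 1 - left).toNat
decreasing_by
  split <;> split <;> simp_all
  all_goals omega

def solution (n : Int) (start_seq : List Int) (end_seq : List Int) : String :=
  if n = 1 then "YES"
  else
    let cnts := (start_seq.zip end_seq).foldl
      (fun (d : PySem.Dict Int Int × PySem.Dict Int Int) p =>
        (d.1.modify p.1 0 (· + 1), d.2.modify p.2 0 (· + 1)))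
      (PySem.Dict.empty, PySem.Dict.empty)
    if pyDictEq cnts.1 cnts.2 = false then "NO"
    else
      let lr := loopA start_seq end_seq 0 (n - 1)
      if PySem.List.sorted (PySem.List.slice start_seq (some lr.1) (some (lr.2 + 1))) (fun x => x) false
           = PySem.List.slice end_seq (some lr.1) (some (lr.2 + 1)) then "YES"
      else "NO"

-- ===== PORT B =====
-- one +1/-1 balance dict over a list of pairs; `any(bal.values())` is the nonzero test
def balStep (d : PySem.Dict Int Int) (p : Int × Int) : PySem.Dict Int Int :=
  (d.modify p.1 0 (· + 1)).modify p.2 0 (· - 1)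

def balanced (pairs : List (Int × Int)) : Bool :=
  !((pairs.foldl balStep PySem.Dict.empty).values.any (fun v => !(v == 0)))

-- `while left < n and start_seq[left] == end_seq[left]: left += 1`
def scanL (s e : List Int) (n left : Int) : Int :=
  if h : left < n ∧ PySem.List.pyGetD s left 0 = PySem.List.pyGetD e left 0 then
    scanL s e n (left + 1)
  else left
termination_by (n - left).toNat
decreasing_by omega

-- `while right > left and start_seq[right] == end_seq[right]: right -= 1`
def scanR (s e : List Int) (left right : Int) : Int :=
  if h : left < right ∧ PySem.List.pyGetD s right 0 = PySem.List.pyGetD e right 0 then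
    scanR s e left (right - 1)
  else right
termination_by (right - left).toNat
decreasing_by omega

def solution_alt (n : Int) (start_seq : List Int) (end_seq : List Int) : String :=
  if n = 1 then "YES"
  else if !balanced (start_seq.zip end_seq) then "NO"
  else
    let l := scanL start_seq end_seq n 0
    let r := scanR start_seq end_seq l (n - 1)
    let midS := PySem.List.slice start_seq (some l) (some (r + 1))
    let midE := PySem.List.slice end_seq (some l) (some (r + 1))
    if (midE.zip (PySem.List.slice midE (some 1) none)).any (fun p => p.2 < p.1) then "NO"
    else if !balanced (midS.zip midE) then "NO"
    else "YES"

-- ===== PRECONDITION & SPEC =====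
-- Pre_ admits every input A decides before indexing (n == 1, or the two coordinate multisets
-- of zip(start_seq, end_seq) differ, so A answers "NO" at the counter comparison) and otherwise
-- requires 0 ≤ n ≤ both lengths; excluded are only inputs where A's loop indexing raises
-- IndexError and negative n with equal multisets, where A compares windows cut by a negative
-- slice bound (an accident of Python slicing).
def Pre_solution (n : Int) (start_seq : List Int) (end_seq : List Int) : Prop :=
  n = 1 ∨
  (((start_seq.zip end_seq).map Prod.fst : Multiset Int)
      ≠ ((start_seq.zip end_seq).map Prod.snd : Multiset Int)) ∨
  (0 ≤ n ∧ n ≤ start_seq.length ∧ n ≤ end_seq.length)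
instance (n : Int) (start_seq : List Int) (end_seq : List Int) : Decidable (Pre_solution n start_seq end_seq) := by unfold Pre_solution; infer_instance

def pvWitness_solution : Int × List Int × List Int := (3, [1, 3, 2], [1, 2, 3])

def Spec_solution (n : Int) (start_seq : List Int) (end_seq : List Int) (out : String) : Prop := out = solution_alt n start_seq end_seq
instance (n : Int) (start_seq : List Int) (end_seq : List Int) (out : String) : Decidable (Spec_solution n start_seq end_seq out) := by unfold Spec_solution; infer_instance

-- ===== CLAIM (what is proved, stated in full; the proofs are below) =====
def Claim_equal_solution : Prop := ∀ (n : Int) (start_seq : List Int) (end_seq : List Int), Dom_solution n start_seq end_seq → Pre_solution n start_seq end_seq → Spec_solution n start_seq end_seq (solution n start_seq end_seq)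

-- ===== LEMMAS AND PROOFS =====
-- lemma: value of the +1/-1 balance fold at any key
theorem getD_balance (pairs : List (Int × Int)) (d : PySem.Dict Int Int) (v : Int) :
    (pairs.foldl balStep d).getD v 0
      = d.getD v 0 + ((pairs.map Prod.fst).count v : Int) - ((pairs.map Prod.snd).count v : Int) := by
  induction pairs generalizing d with
  | nil => simp
  | cons p t ih =>
    simp only [List.foldl_cons, List.map_cons, ih, balStep]
    by_cases h1 : v = p.1 <;> by_cases h2 : v = p.2 <;>
      simp [PySem.Dict.getD_modify, h1, h2, List.count_cons] <;> omega

theorem nodup_keys_balance (pairs : List (Int × Int)) :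
    (pairs.foldl balStep PySem.Dict.empty).keys.Nodup := by
  have : ∀ (t : List (Int × Int)) (d : PySem.Dict Int Int), d.keys.Nodup →
      (t.foldl balStep d).keys.Nodup := by
    intro t
    induction t with
    | nil => intro d h; exact h
    | cons p r ih =>
      intro d h
      apply ih
      have h1 : (d.modify p.1 0 (· + 1)).keys.Nodup := by
        rw [PySem.Dict.keys_modify]
        rcases hc : d.contains p.1 with _ | _
        · rw [PySem.Dict.keys_insert_of_not_contains _ _ hc]
          simp only [List.nodup_append, List.nodup_cons]
          refine ⟨h, by simp, ?_⟩
          intro a ha b hb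
          simp only [List.mem_singleton] at hb
          subst hb
          intro he
          exact absurd ((PySem.Dict.contains_iff_mem_keys _ _).2 (he ▸ ha)) (by simp [hc])
        · rw [PySem.Dict.keys_insert_of_contains _ _ hc]; exact h
      rw [balStep, PySem.Dict.keys_modify]
      rcases hc : (d.modify p.1 0 (· + 1)).contains p.2 with _ | _
      · rw [PySem.Dict.keys_insert_of_not_contains _ _ hc]
        simp only [List.nodup_append, List.nodup_cons]
        refine ⟨h1, by simp, ?_⟩
        intro a ha b hb
        simp only [List.mem_singleton] at hb
        subst hb
        intro he
        exact absurd ((PySem.Dict.contains_iff_mem_keys _ _).2 (he ▸ ha)) (by simp [hc])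
      · rw [PySem.Dict.keys_insert_of_contains _ _ hc]; exact h1
  exact this pairs _ (by simp [PySem.Dict.empty])

-- `any(bal.values())` is false exactly when the two coordinate multisets agree
theorem balanced_iff (pairs : List (Int × Int)) :
    balanced pairs = true ↔ ∀ v, (pairs.map Prod.fst).count v = (pairs.map Prod.snd).count v := by
  unfold balanced
  rw [Bool.not_eq_eq_eq_not]
  simp only [Bool.not_true]
  constructor
  · intro h v
    have hv : (pairs.foldl balStep PySem.Dict.empty).getD v 0 = 0 := by
      by_cases hm : v ∈ (pairs.foldl balStep PySem.Dict.empty).keys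
      · by_contra hne
        have : (pairs.foldl balStep PySem.Dict.empty).getD v 0
            ∈ (pairs.foldl balStep PySem.Dict.empty).values := by
          rw [PySem.Dict.values_eq_map_keys _ (nodup_keys_balance pairs) 0]
          exact List.mem_map.2 ⟨v, hm, rfl⟩
        have := List.any_eq_false.1 h _ this
        simp at this
        exact hne this
      · exact PySem.Dict.getD_of_not_contains _ _ (by
          rcases hc : (pairs.foldl balStep PySem.Dict.empty).contains v with _ | _
          · rfl
          · exact absurd ((PySem.Dict.contains_iff_mem_keys _ _).1 hc) hm)
    have := getD_balance pairs PySem.Dict.empty v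
    rw [hv] at this
    simp [PySem.Dict.getD_empty] at this
    omega
  · intro h
    apply List.any_eq_false.2
    intro x hx
    rw [PySem.Dict.values_eq_map_keys _ (nodup_keys_balance pairs) 0] at hx
    rcases List.mem_map.1 hx with ⟨k, _, rfl⟩
    have := getD_balance pairs PySem.Dict.empty k
    simp [PySem.Dict.getD_empty, h k] at this
    simp [this]

-- A's pair-of-dicts loop is (Counter(fst), Counter(snd))
theorem cnts_eq (pairs : List (Int × Int)) :
    (pairs.foldl (fun (d : PySem.Dict Int Int × PySem.Dict Int Int) p =>
        (d.1.modify p.1 0 (· + 1), d.2.modify p.2 0 (· + 1)))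
      (PySem.Dict.empty, PySem.Dict.empty))
    = (PySem.Dict.counter (pairs.map Prod.fst), PySem.Dict.counter (pairs.map Prod.snd)) := by
  refine (PySem.List.foldl_prod_mk (fun (d : PySem.Dict Int Int) (p : Int × Int) => d.modify p.1 0 (· + 1))
    (fun (d : PySem.Dict Int Int) (p : Int × Int) => d.modify p.2 0 (· + 1)) pairs PySem.Dict.empty PySem.Dict.empty).trans ?_
  rw [PySem.Dict.counter_eq_foldl, PySem.Dict.counter_eq_foldl, List.foldl_map, List.foldl_map]

-- Python's `Counter-dict == Counter-dict` is exact count agreement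
theorem pyDictEq_counter_iff (xs ys : List Int) :
    pyDictEq (PySem.Dict.counter xs) (PySem.Dict.counter ys) = true
      ↔ ∀ v, xs.count v = ys.count v := by
  unfold pyDictEq
  rw [Bool.and_eq_true, PySem.Set.equal_iff, List.all_eq_true]
  constructor
  · intro ⟨hk, hv⟩ v
    by_cases hm : v ∈ xs
    · have h1 : v ∈ (PySem.Dict.counter xs).keys := by
        rw [PySem.Dict.keys_counter]; exact (PySem.Set.mem_ofList _ _).2 hm
      have := hv v h1
      simp only [beq_iff_eq] at this
      have hD : (PySem.Dict.counter xs).getD v 0 = (PySem.Dict.counter ys).getD v 0 := by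
        rw [PySem.Dict.getD_eq_get?_getD, PySem.Dict.getD_eq_get?_getD, this]
      rw [PySem.Dict.getD_counter, PySem.Dict.getD_counter] at hD
      exact_mod_cast hD
    · have hm' : v ∉ ys := by
        intro hy
        exact hm ((PySem.Set.mem_ofList _ _).1 ((PySem.Dict.keys_counter xs ▸
          PySem.Dict.keys_counter ys ▸ hk v).2 ((PySem.Set.mem_ofList _ _).2 hy)))
      rw [List.count_eq_zero.2 hm, List.count_eq_zero.2 hm']
  · intro h
    have hmem : ∀ v, v ∈ xs ↔ v ∈ ys := by
      intro v
      rw [← List.count_pos_iff, ← List.count_pos_iff, h v]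
    constructor
    · intro v
      rw [PySem.Dict.keys_counter, PySem.Dict.keys_counter, PySem.Set.mem_ofList,
        PySem.Set.mem_ofList]
      exact hmem v
    · intro k hk
      rw [PySem.Dict.keys_counter, PySem.Set.mem_ofList] at hk
      have h1 : (PySem.Dict.counter xs).contains k = true := by
        rw [PySem.Dict.contains_iff_mem_keys, PySem.Dict.keys_counter, PySem.Set.mem_ofList]
        exact hk
      have h2 : (PySem.Dict.counter ys).contains k = true := by
        rw [PySem.Dict.contains_iff_mem_keys, PySem.Dict.keys_counter, PySem.Set.mem_ofList]
        exact (hmem k).1 hk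
      rcases hg1 : (PySem.Dict.counter xs).get? k with _ | w1
      · rw [PySem.Dict.get?_eq_none_iff_contains] at hg1; rw [h1] at hg1; cases hg1
      rcases hg2 : (PySem.Dict.counter ys).get? k with _ | w2
      · rw [PySem.Dict.get?_eq_none_iff_contains] at hg2; rw [h2] at hg2; cases hg2
      have e1 : w1 = ((xs.count k : Int)) := by
        have := PySem.Dict.getD_counter xs k
        rw [PySem.Dict.getD_eq_get?_getD, hg1] at this
        simpa using this
      have e2 : w2 = ((ys.count k : Int)) := by
        have := PySem.Dict.getD_counter ys k
        rw [PySem.Dict.getD_eq_get?_getD, hg2] at this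
        simpa using this
      simp [e1, e2, h k]

-- "positions i match" shorthand used by the scan/loop characterisations
def Mt (s e : List Int) (i : Int) : Prop := PySem.List.pyGetD s i 0 = PySem.List.pyGetD e i 0

theorem scanL_spec (s e : List Int) (n : Int) : ∀ a, 0 ≤ a → a ≤ n →
    a ≤ scanL s e n a ∧ scanL s e n a ≤ n ∧
    (∀ i, a ≤ i → i < scanL s e n a → Mt s e i) ∧
    (scanL s e n a = n ∨ ¬ Mt s e (scanL s e n a)) := by
  intro a
  induction a using scanL.induct s e n with
  | case1 a h ih =>
    intro h0 hn
    rw [scanL, dif_pos h]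
    obtain ⟨i1, i2, i3, i4⟩ := ih (by omega) (by omega)
    refine ⟨by omega, i2, ?_, i4⟩
    intro i hi1 hi2
    by_cases hia : i = a
    · subst hia; exact h.2
    · exact i3 i (by omega) hi2
  | case2 a h =>
    intro h0 hn
    rw [scanL, dif_neg h]
    refine ⟨le_refl _, by omega, by omega, ?_⟩
    by_cases he : a = n
    · exact Or.inl he
    · exact Or.inr (fun hm => h ⟨by omega, hm⟩)

theorem scanR_spec (s e : List Int) (l : Int) : ∀ r, l ≤ r →
    l ≤ scanR s e l r ∧ scanR s e l r ≤ r ∧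
    (∀ i, scanR s e l r < i → i ≤ r → Mt s e i) ∧
    (scanR s e l r = l ∨ ¬ Mt s e (scanR s e l r)) := by
  intro r
  induction r using scanR.induct s e l with
  | case1 r h ih =>
    intro hl
    rw [scanR, dif_pos h]
    obtain ⟨i1, i2, i3, i4⟩ := ih (by omega)
    refine ⟨i1, by omega, ?_, i4⟩
    intro i hi1 hi2
    by_cases hir : i = r
    · subst hir; exact h.2
    · exact i3 i hi1 (by omega)
  | case2 r h =>
    intro hl
    rw [scanR, dif_neg h]
    refine ⟨hl, le_refl _, by omega, ?_⟩
    by_cases he : r = l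
    · exact Or.inl he
    · exact Or.inr (fun hm => h ⟨by omega, hm⟩)

theorem scanR_of_le (s e : List Int) (l r : Int) (h : r ≤ l) : scanR s e l r = r := by
  rw [scanR, dif_neg (fun hc => absurd hc.1 (by omega))]

theorem loopA_spec (s e : List Int) (n : Int) : ∀ l r, 0 ≤ l → -1 ≤ r → r ≤ n - 1 → l ≤ r + 2 →
    (∀ i, 0 ≤ i → i < l → Mt s e i) → (∀ i, r < i → i ≤ n - 1 → Mt s e i) →
    0 ≤ (loopA s e l r).1 ∧ -1 ≤ (loopA s e l r).2 ∧ (loopA s e l r).2 ≤ n - 1 ∧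
    (loopA s e l r).1 ≤ (loopA s e l r).2 + 2 ∧
    (∀ i, 0 ≤ i → i < (loopA s e l r).1 → Mt s e i) ∧
    (∀ i, (loopA s e l r).2 < i → i ≤ n - 1 → Mt s e i) ∧
    ((loopA s e l r).2 < (loopA s e l r).1 ∨
      (¬ Mt s e (loopA s e l r).1 ∧ ¬ Mt s e (loopA s e l r).2 ∧
        (loopA s e l r).1 ≤ (loopA s e l r).2)) := by
  intro l r
  induction l, r using loopA.induct s e with
  | case1 l r h ih =>
    intro h0 hm1 hn hlr hpre hsuf
    rw [loopA, dif_pos h]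
    apply ih
    · obtain ⟨h1, hor⟩ := h; split <;> omega
    · obtain ⟨h1, hor⟩ := h; split <;> omega
    · obtain ⟨h1, hor⟩ := h; split <;> omega
    · obtain ⟨h1, hor⟩ := h; split <;> split <;> omega
    · intro i hi1 hi2
      split at hi2
      · rename_i hml
        by_cases hil : i = l
        · subst hil; exact hml
        · exact hpre i hi1 (by omega)
      · exact hpre i hi1 hi2
    · intro i hi1 hi2
      split at hi1
      · rename_i hmr
        by_cases hir : i = r
        · subst hir; exact hmr
        · exact hsuf i (by omega) hi2
      · exact hsuf i hi1 hi2
  | case2 l r h =>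
    intro h0 hm1 hn hlr hpre hsuf
    rw [loopA, dif_neg h]
    simp only
    refine ⟨h0, hm1, hn, hlr, hpre, hsuf, ?_⟩
    by_cases hc : r < l
    · exact Or.inl hc
    · have h1 : ¬ (PySem.List.pyGetD s l 0 = PySem.List.pyGetD e l 0 ∨
          PySem.List.pyGetD s r 0 = PySem.List.pyGetD e r 0) :=
        fun hd => h ⟨by omega, hd⟩
      exact Or.inr ⟨fun hm => h1 (Or.inl hm), fun hm => h1 (Or.inr hm), by omega⟩

-- B's adjacent test over zip(w, w[1:]) is exactly "w is non-decreasing"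
theorem anyLt_zip_tail_iff (l : List Int) :
    ((l.zip l.tail).any (fun p => p.2 < p.1) = false) ↔ l.Pairwise (· ≤ ·) := by
  rw [← List.isChain_iff_pairwise]
  induction l with
  | nil => simp
  | cons a t ih =>
    cases t with
    | nil => simp
    | cons b t' =>
      simp only [List.tail_cons, List.zip_cons_cons, List.any_cons, Bool.or_eq_false_iff,
        List.isChain_cons_cons] at *
      constructor
      · intro ⟨h1, h2⟩
        exact ⟨by simpa using h1, ih.1 h2⟩
      · intro ⟨h1, h2⟩
        exact ⟨by simpa using h1, ih.2 h2⟩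

-- the sort-free characterisation of A's `sorted(ws) == we` for equally long windows
theorem sorted_eq_iff (ws we : List Int) (hlen : ws.length = we.length) :
    (PySem.List.sorted ws (fun x => x) false = we)
      ↔ (((we.zip (PySem.List.slice we (some 1) none)).any (fun p => p.2 < p.1) = false)
         ∧ balanced (ws.zip we) = true) := by
  rw [PySem.List.slice_from_one, anyLt_zip_tail_iff, balanced_iff]
  have hmf : (ws.zip we).map Prod.fst = ws := List.map_fst_zip (by omega)
  have hms : (ws.zip we).map Prod.snd = we := List.map_snd_zip (by omega)
  rw [hmf, hms]
  constructor
  · intro h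
    refine ⟨h ▸ PySem.List.sorted_pairwise ws (fun x => x), ?_⟩
    have hperm : List.Perm (PySem.List.sorted ws (fun x => x)) ws :=
      PySem.List.sorted_perm ws (fun x => x) false
    rw [h] at hperm
    exact fun v => (List.perm_iff_count.1 hperm v).symm
  · intro ⟨hp, hc⟩
    exact PySem.List.sorted_id_eq_of_perm_of_pairwise ws we
      (List.perm_iff_count.2 (fun v => (hc v).symm)) hp

-- ===== VERDICT (by name: the statement is the Claim_ definition above) =====
theorem solution_spec : Claim_equal_solution := by
  intro n s e hdom hpre
  unfold Spec_solution solution solution_alt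
  by_cases h1 : n = 1
  · simp [h1]
  · rw [if_neg h1, if_neg h1]
    simp only [cnts_eq]
    have hcond : (pyDictEq (PySem.Dict.counter ((s.zip e).map Prod.fst))
        (PySem.Dict.counter ((s.zip e).map Prod.snd))) = balanced (s.zip e) := by
      rw [Bool.eq_iff_iff, pyDictEq_counter_iff, balanced_iff]
    rw [hcond]
    cases hb : balanced (s.zip e) with
    | false => simp
    | true =>
      obtain ⟨hn0, hns, hne⟩ : 0 ≤ n ∧ n ≤ s.length ∧ n ≤ e.length := by
        rcases hpre with h | h | h
        · exact absurd h h1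
        · exact absurd (by
            rw [Multiset.coe_eq_coe]
            exact List.perm_iff_count.2 ((balanced_iff (s.zip e)).1 hb)) h
        · exact h
      simp only [Bool.not_true, Bool.false_eq_true, if_false]
      rw [if_neg (by decide : ¬ (true = false))]
      obtain ⟨A1, A2, A3, A4, A5, A6, A7⟩ :=
        loopA_spec s e n 0 (n - 1) (by omega) (by omega) (by omega) (by omega)
          (fun i hi1 hi2 => absurd hi2 (by omega))
          (fun i hi1 hi2 => absurd hi1 (by omega))
      obtain ⟨L1, L2, L3, L4⟩ := scanL_spec s e n 0 (by omega) (by omega)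
      by_cases hex : ∃ i, 0 ≤ i ∧ i ≤ n - 1 ∧ ¬ Mt s e i
      · obtain ⟨i0, h01, h02, h0M⟩ := hex
        have hra_la : ¬ (loopA s e 0 (n - 1)).2 < (loopA s e 0 (n - 1)).1 := by
          intro hc
          by_cases hil : i0 < (loopA s e 0 (n - 1)).1
          · exact h0M (A5 i0 h01 hil)
          · exact h0M (A6 i0 (by omega) h02)
        obtain ⟨hMla, hMra, hlar⟩ := A7.resolve_left hra_la
        have hLn : ¬ scanL s e n 0 = n := by
          intro hc
          exact h0M (L3 i0 (by omega) (by omega))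
        have hLm := L4.resolve_left hLn
        have hLla : scanL s e n 0 = (loopA s e 0 (n - 1)).1 := by
          rcases lt_trichotomy (scanL s e n 0) (loopA s e 0 (n - 1)).1 with h | h | h
          · exact absurd (A5 _ (by omega) h) hLm
          · exact h
          · exact absurd (L3 _ (by omega) h) hMla
        rw [hLla]
        obtain ⟨R1, R2, R3, R4⟩ := scanR_spec s e (loopA s e 0 (n - 1)).1 (n - 1) (by omega)
        have hRra : scanR s e (loopA s e 0 (n - 1)).1 (n - 1) = (loopA s e 0 (n - 1)).2 := by
          have hge : (loopA s e 0 (n - 1)).2 ≤ scanR s e (loopA s e 0 (n - 1)).1 (n - 1) := by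
            by_contra hc
            exact hMra (R3 _ (by omega) (by omega))
          rcases R4 with hR | hR
          · omega
          · by_contra hc
            exact hR (A6 _ (by omega) (by omega))
        rw [hRra]
        have hlen : (PySem.List.slice s (some (loopA s e 0 (n - 1)).1)
              (some ((loopA s e 0 (n - 1)).2 + 1))).length
            = (PySem.List.slice e (some (loopA s e 0 (n - 1)).1)
              (some ((loopA s e 0 (n - 1)).2 + 1))).length := by
          rw [PySem.List.slice_toNat _ (by omega) (by omega),
            PySem.List.slice_toNat _ (by omega) (by omega)]
          simp only [List.length_take, List.length_drop]
          omega
        have hiff := sorted_eq_iff _ _ hlen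
        by_cases hA : (PySem.List.sorted (PySem.List.slice s (some (loopA s e 0 (n - 1)).1)
              (some ((loopA s e 0 (n - 1)).2 + 1))) (fun x => x) false)
            = PySem.List.slice e (some (loopA s e 0 (n - 1)).1) (some ((loopA s e 0 (n - 1)).2 + 1))
        · rw [if_pos hA]
          obtain ⟨hm, hbal⟩ := hiff.1 hA
          rw [if_neg (by simp [hm]), if_neg (by simp [hbal])]
        · rw [if_neg hA]
          by_cases hB1 : (((PySem.List.slice e (some (loopA s e 0 (n - 1)).1)
                (some ((loopA s e 0 (n - 1)).2 + 1))).zip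
                  (PySem.List.slice (PySem.List.slice e (some (loopA s e 0 (n - 1)).1)
                    (some ((loopA s e 0 (n - 1)).2 + 1))) (some 1) none)).any
                (fun p => p.2 < p.1)) = true
          · rw [if_pos hB1]
          · rw [if_neg hB1]
            by_cases hB2 : (!balanced ((PySem.List.slice s (some (loopA s e 0 (n - 1)).1)
                  (some ((loopA s e 0 (n - 1)).2 + 1))).zip
                    (PySem.List.slice e (some (loopA s e 0 (n - 1)).1)
                      (some ((loopA s e 0 (n - 1)).2 + 1))))) = true
            · rw [if_pos hB2]
            · exact absurd (hiff.2 ⟨by simpa using hB1, by simpa using hB2⟩) hA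
      · have hall : ∀ i, 0 ≤ i → i ≤ n - 1 → Mt s e i := by
          intro i hi1 hi2
          by_contra hc
          exact hex ⟨i, hi1, hi2, hc⟩
        have hra : (loopA s e 0 (n - 1)).2 < (loopA s e 0 (n - 1)).1 := by
          rcases A7 with h | h
          · exact h
          · exact absurd (hall _ A1 (by omega)) h.1
        have hLn : scanL s e n 0 = n := by
          rcases L4 with h | h
          · exact h
          · by_cases hc : scanL s e n 0 = n
            · exact hc
            · exact absurd (hall _ (by omega) (by omega)) h
        have hAS : PySem.List.slice s (some (loopA s e 0 (n - 1)).1)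
            (some ((loopA s e 0 (n - 1)).2 + 1)) = [] := by
          rw [PySem.List.slice_toNat _ (by omega) (by omega)]
          have h0 : ((loopA s e 0 (n - 1)).2 + 1).toNat - ((loopA s e 0 (n - 1)).1).toNat = 0 := by
            omega
          rw [h0]; simp
        have hAE : PySem.List.slice e (some (loopA s e 0 (n - 1)).1)
            (some ((loopA s e 0 (n - 1)).2 + 1)) = [] := by
          rw [PySem.List.slice_toNat _ (by omega) (by omega)]
          have h0 : ((loopA s e 0 (n - 1)).2 + 1).toNat - ((loopA s e 0 (n - 1)).1).toNat = 0 := by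
            omega
          rw [h0]; simp
        rw [hLn, scanR_of_le s e n (n - 1) (by omega), hAS, hAE]
        have hBS : PySem.List.slice s (some n) (some (n - 1 + 1)) = [] := by
          rw [PySem.List.slice_toNat _ (by omega) (by omega)]
          have h0 : (n - 1 + 1).toNat - n.toNat = 0 := by omega
          rw [h0]; simp
        have hBE : PySem.List.slice e (some n) (some (n - 1 + 1)) = [] := by
          rw [PySem.List.slice_toNat _ (by omega) (by omega)]
          have h0 : (n - 1 + 1).toNat - n.toNat = 0 := by omega
          rw [h0]; simp
        rw [hBS, hBE]
        rw [if_pos ((PySem.List.sorted_eq_nil_iff _ _ _).2 rfl)]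
        simp [balanced]
        intro x hx
        simp [PySem.Dict.empty, PySem.Dict.values] at hx
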